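-- pv_equiv track=rewrite | github.com/lebastr/segmentation | src/grid.py | eval_grid
-- ===== SOURCE A (Python) =====
-- def eval_grid(image_size, tile_size):
--     assert tile_size > 0, "tile_size must be positive"
--     assert image_size >= tile_size, "Image_size must be greater than tile_size"
--     if image_size % tile_size == 0:
--         n = image_size / tile_size
--         x = 0
--         q = 0
--
--     else:
--         n = image_size // tile_size + 1
--         x = (n*tile_size - image_size) // (n-1)
--         q = (n*tile_size - image_size) % (n-1)
--
--     p = n - 1 - q
--
--     points = [0]
--     for i in range(p):
--         points.append(points[-1] + tile_size - x)
--
--     for i in range(q):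
--         points.append(points[-1] + tile_size - x - 1)
--
--     return points
-- ===== SOURCE B (Python) =====
-- def eval_grid(image_size, tile_size):
--     assert tile_size > 0, "tile_size must be positive"
--     assert image_size >= tile_size, "Image_size must be greater than tile_size"
--     n = image_size // tile_size + 1
--     x, q = divmod(n * tile_size - image_size, n - 1)
--     p = n - 1 - q
--     step = tile_size - x
--     return [min(i, p) * step + max(i - p, 0) * (step - 1) for i in range(n)]
-- ===== Notes on version B (the rewrite author's own statement) =====
-- stated objective: simpler
-- what changed: B drops A's divisible-case branch (excluded by Pre_: A raises TypeError there) and replaces A's two sequential running-sum append loops by a single comprehension over range(n) computing each coordinate independently by the closed formula min(i,p)*step + max(i-p,0)*(step-1).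
import Mathlib
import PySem

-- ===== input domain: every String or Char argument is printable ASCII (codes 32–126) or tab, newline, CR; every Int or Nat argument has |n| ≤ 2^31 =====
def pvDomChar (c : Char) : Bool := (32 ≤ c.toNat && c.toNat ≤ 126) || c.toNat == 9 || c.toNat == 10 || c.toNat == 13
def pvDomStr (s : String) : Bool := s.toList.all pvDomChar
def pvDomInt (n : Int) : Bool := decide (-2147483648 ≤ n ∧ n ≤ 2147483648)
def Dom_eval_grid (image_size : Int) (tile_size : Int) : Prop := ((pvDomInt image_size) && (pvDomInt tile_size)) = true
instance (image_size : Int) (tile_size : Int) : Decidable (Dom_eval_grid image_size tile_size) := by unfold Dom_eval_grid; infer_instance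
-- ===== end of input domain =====

-- B replaces A's branch plus two running-sum append loops by one comprehension computing each
-- coordinate independently from its index; neither mutates its arguments.

-- ===== PORT A =====
-- In the divisible branch Python's 'n = image_size / tile_size' is a float and 'range(p)' raises
-- TypeError, so A never returns there (excluded by Pre_); the port uses floordiv in that branch
-- only to stay total.
def eval_grid (image_size : Int) (tile_size : Int) : List Int :=
  let nxq : Int × Int × Int :=
    if PySem.Int.mod image_size tile_size == 0 then
      (PySem.Int.floordiv image_size tile_size, 0, 0)
    else
      let n := PySem.Int.floordiv image_size tile_size + 1
      (n, PySem.Int.floordiv (n * tile_size - image_size) (n - 1),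
          PySem.Int.mod (n * tile_size - image_size) (n - 1))
  let n := nxq.1
  let x := nxq.2.1
  let q := nxq.2.2
  let p := n - 1 - q
  let points : List Int :=
    (PySem.List.pyRange 0 p 1).foldl
      (fun pts _ => pts ++ [(PySem.List.pyGet? pts (-1)).getD 0 + tile_size - x]) [0]
  (PySem.List.pyRange 0 q 1).foldl
    (fun pts _ => pts ++ [(PySem.List.pyGet? pts (-1)).getD 0 + tile_size - x - 1]) points

-- ===== PORT B =====
-- Source B's 'x, q = divmod(d, n - 1)' is ported as the pair (floordiv d (n-1), mod d (n-1));
-- exact whenever n - 1 ≠ 0, which Pre_ guarantees (Python divmod raises on a zero divisor).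
def eval_grid_alt (image_size : Int) (tile_size : Int) : List Int :=
  let n := PySem.Int.floordiv image_size tile_size + 1
  let x := PySem.Int.floordiv (n * tile_size - image_size) (n - 1)
  let q := PySem.Int.mod (n * tile_size - image_size) (n - 1)
  let p := n - 1 - q
  let step := tile_size - x
  (PySem.List.pyRange 0 n 1).map
    (fun i => min i p * step + max (i - p) 0 * (step - 1))

-- ===== PRECONDITION & SPEC =====
-- Pre_ excludes tile_size ≤ 0 and image_size < tile_size (AssertionError) and the divisible case
-- image_size % tile_size == 0, where A's 'n' is a float and 'range(p)' raises TypeError.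
def Pre_eval_grid (image_size : Int) (tile_size : Int) : Prop :=
  tile_size > 0 ∧ image_size ≥ tile_size ∧ PySem.Int.mod image_size tile_size ≠ 0
instance (image_size : Int) (tile_size : Int) : Decidable (Pre_eval_grid image_size tile_size) := by
  unfold Pre_eval_grid; infer_instance
def pvWitness_eval_grid : Int × Int := (7, 3)

def Spec_eval_grid (image_size : Int) (tile_size : Int) (out : List Int) : Prop :=
  out = eval_grid_alt image_size tile_size
instance (image_size : Int) (tile_size : Int) (out : List Int) : Decidable (Spec_eval_grid image_size tile_size out) := by
  unfold Spec_eval_grid; infer_instance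

-- ===== CLAIM (what is proved, stated in full; the proofs are below) =====
def Claim_equal_eval_grid : Prop := ∀ (image_size : Int) (tile_size : Int), Dom_eval_grid image_size tile_size → Pre_eval_grid image_size tile_size → Spec_eval_grid image_size tile_size (eval_grid image_size tile_size)

-- ===== LEMMAS AND PROOFS =====

-- a foldl that ignores the list elements is function iteration
theorem foldl_ignore {α β : Type} (f : β → β) (l : List α) :
    ∀ (init : β), l.foldl (fun s _ => f s) init = f^[l.length] init := by
  induction l with
  | nil => intro init; rfl
  | cons a l ih =>
      intro init
      simp [List.foldl, ih, Function.iterate_succ_apply]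

-- iterating A's append step from a list with known last element
theorem iter_append (c : Int) :
    ∀ (m : Nat) (pts : List Int) (a : Int), pts.getLast? = some a →
      (fun pts => pts ++ [(PySem.List.pyGet? pts (-1)).getD 0 + c])^[m] pts
        = pts ++ (List.range m).map (fun j : Nat => a + ((j : Int) + 1) * c) := by
  intro m
  induction m with
  | zero => intro pts a h; simp
  | succ m ih =>
      intro pts a h
      rw [Function.iterate_succ_apply]
      have hstep : pts ++ [(PySem.List.pyGet? pts (-1)).getD 0 + c] = pts ++ [a + c] := by
        simp [PySem.List.pyGet?_neg_one, h]
      rw [hstep, ih (pts ++ [a + c]) (a + c) (by simp)]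
      rw [List.append_assoc, List.range_succ_eq_map, List.map_cons, List.map_map,
          List.singleton_append]
      congr 1
      congr 1
      · push_cast; ring
      · apply List.map_congr_left
        intro j _
        simp only [Function.comp]
        push_cast
        ring

theorem getLast?_zero_cons_map (c : Int) (m : Nat) :
    ((0 : Int) :: (List.range m).map (fun j : Nat => ((j : Int) + 1) * c)).getLast? = some ((m : Int) * c) := by
  cases m with
  | zero => simp
  | succ m =>
      rw [List.range_succ, List.map_append, List.map_singleton, ← List.cons_append,
          List.getLast?_concat]
      norm_cast

-- ===== VERDICT =====
theorem eval_grid_spec : Claim_equal_eval_grid := by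
  unfold Claim_equal_eval_grid
  intro im t _ hpre
  obtain ⟨ht, him, hmod⟩ := hpre
  unfold Spec_eval_grid eval_grid eval_grid_alt
  simp only [beq_iff_eq, hmod, if_false]
  set n := PySem.Int.floordiv im t + 1 with hn
  set x := PySem.Int.floordiv (n * t - im) (n - 1) with hx
  set q := PySem.Int.mod (n * t - im) (n - 1) with hq
  -- bounds: n ≥ 2, 0 ≤ q ≤ n - 2
  have hfd : 1 ≤ PySem.Int.floordiv im t := by
    rw [PySem.Int.le_floordiv_iff_mul_le ht]; omega
  have hn2 : 2 ≤ n := by omega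
  have hq0 : 0 ≤ q ∧ q < n - 1 := by
    rw [hq, PySem.Int.mod_eq_emod_of_pos (by omega : (0:Int) < n - 1)]
    exact ⟨Int.emod_nonneg _ (by omega), Int.emod_lt_of_pos _ (by omega)⟩
  set p := n - 1 - q with hp
  have hp1 : 1 ≤ p := by omega
  -- A's side: the two running-sum loops as explicit lists
  simp only [show ∀ g : Int, g + t - x = g + (t - x) from fun g => by ring,
             show ∀ g : Int, g + (t - x) - 1 = g + (t - x - 1) from fun g => by ring]
  rw [foldl_ignore, foldl_ignore]
  simp only [PySem.List.length_pyRange_one, sub_zero]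
  rw [iter_append (t - x) p.toNat [0] 0 (by simp)]
  simp only [List.singleton_append, zero_add]
  rw [iter_append (t - x - 1) q.toNat _ ((p.toNat : Int) * (t - x))
        (getLast?_zero_cons_map (t - x) p.toNat)]
  -- B's side: split range(n) at p + 1 and simplify min/max on each piece
  rw [PySem.List.pyRange_one_append 0 (p + 1) n (by omega) (by omega), List.map_append]
  rw [PySem.List.pyRange_one 0 (p + 1), PySem.List.pyRange_one (p + 1) n]
  have hp' : (p + 1 - 0).toNat = p.toNat + 1 := by omega
  have hq' : (n - (p + 1)).toNat = q.toNat := by omega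
  have hpc : (p.toNat : Int) = p := by omega
  rw [hp', hq', List.range_succ_eq_map, List.map_cons, List.map_map, List.map_map]
  simp only [List.cons_append]
  congr 1
  · simp [show (0:Int) ≤ p from by omega]
  congr 1
  · rw [List.map_map]
    apply List.map_congr_left
    intro k hk
    rw [List.mem_range] at hk
    have hkp : ((k : Int) + 1) ≤ p := by omega
    simp only [Function.comp, Nat.succ_eq_add_one, zero_add]
    rw [min_eq_left (by push_cast; omega), max_eq_right (by push_cast; omega)]
    push_cast; ring
  · apply List.map_congr_left
    intro k hk
    rw [List.mem_range] at hk
    simp only [Function.comp]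
    rw [min_eq_right (by omega), max_eq_left (by omega)]
    push_cast [hpc]; ring
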